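-- pv_equiv track=rewrite | github.com/SimonBlanke/Gradient-Free-Optimizers | src/gradient_free_optimizers/optimizers/pop_opt/moead.py | find_n_partitions
-- ===== SOURCE A (Python) =====
-- import math
--
-- def find_n_partitions(n_objectives: int, target_population: int) -> int:
--     """Find H such that C(H + m - 1, m - 1) is closest to target."""
--     if n_objectives <= 2:
--         return max(1, target_population - 1)
--
--     best_h, best_diff = 1, float("inf")
--     for h in range(1, 200):
--         n_vec = math.comb(h + n_objectives - 1, n_objectives - 1)
--         diff = abs(n_vec - target_population)
--         if diff < best_diff:
--             best_diff = diff
--             best_h = h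
--         if n_vec > target_population * 2:
--             break
--     return best_h
-- ===== SOURCE B (Python) =====
-- import math
--
-- def find_n_partitions(n_objectives: int, target_population: int) -> int:
--     """Find H such that C(H + m - 1, m - 1) is closest to target."""
--     if n_objectives <= 2:
--         return max(1, target_population - 1)
--     m = n_objectives
--
--     def C(h):
--         return math.comb(h + m - 1, m - 1)
--
--     # If even h=199 stays below the target, the diffs keep shrinking: clamp.
--     if C(199) < target_population:
--         return 199
--     # C is strictly increasing in h: binary-search the smallest h with C(h) >= target.
--     lo, hi = 1, 199
--     while lo < hi:
--         mid = (lo + hi) // 2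
--         if C(mid) >= target_population:
--             hi = mid
--         else:
--             lo = mid + 1
--     if lo == 1:
--         return 1
--     # Optimum is lo or lo-1; ties go to the smaller h (A keeps the first minimum).
--     if C(lo) - target_population < target_population - C(lo - 1):
--         return lo
--     return lo - 1
-- ===== Notes on version B (the rewrite author's own statement) =====
-- stated objective: alternative
-- what changed: Replaces the linear scan that tracks the best |C(h)-target| with early break by a binary search (over h in [1,199]) for the crossover h where C(h) first reaches the target, exploiting strict monotonicity of C(h)=comb(h+m-1,m-1); the answer is the crossover or its predecessor, ties to the smaller h, with an explicit clamp to 199 when even C(199) is below target.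
import Mathlib
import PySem

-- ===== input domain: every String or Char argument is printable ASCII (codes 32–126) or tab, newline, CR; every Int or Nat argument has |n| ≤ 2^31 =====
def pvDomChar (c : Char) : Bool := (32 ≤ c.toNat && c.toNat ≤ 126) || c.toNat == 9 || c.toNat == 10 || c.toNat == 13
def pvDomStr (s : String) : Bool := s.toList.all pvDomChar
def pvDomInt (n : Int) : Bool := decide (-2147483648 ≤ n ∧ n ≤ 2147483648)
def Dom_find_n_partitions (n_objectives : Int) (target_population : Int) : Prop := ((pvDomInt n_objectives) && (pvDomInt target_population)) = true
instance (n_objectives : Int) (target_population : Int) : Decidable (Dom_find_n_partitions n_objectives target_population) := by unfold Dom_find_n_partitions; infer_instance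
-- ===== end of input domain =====

-- B replaces A's linear scan (best-|C(h)-target| tracking with an early break) by a binary
-- search for the crossover h where C(h) first reaches the target; same return value, proved equal.

-- ===== PORT A =====
-- Port of Python's math.comb(n, k), exact for 0 ≤ n, 0 ≤ k (the only arguments either
-- program passes): the k-term product with exact stepwise division, using the smaller
-- of k and n-k, just as CPython does.  Shared by both ports (both Pythons call math.comb).
def mathComb (n k : Int) : Int :=
  let n' := n.toNat
  let k' := k.toNat
  if n' < k' then 0
  else ((List.range (min k' (n' - k'))).foldl (fun acc i => acc * (n' - i) / (i + 1)) 1 : Nat)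

-- `best_diff` starts at float("inf"); an Int diff compares < inf always, so inf is `none`.
def pyLtInf (d : Int) (bd : Option Int) : Bool :=
  match bd with
  | none => true
  | some b => d < b

-- the `for h in range(1, 200)` loop of A, with its strict-< update and `n_vec > target*2` break
def loopA (m t : Int) : Nat → Int → Int → Option Int → Int
  | 0, _, best_h, _ => best_h
  | (fuel+1), h, best_h, best_diff =>
    if t * 2 < mathComb (h + m - 1) (m - 1) then
      (if pyLtInf |mathComb (h + m - 1) (m - 1) - t| best_diff then h else best_h)
    else
      loopA m t fuel (h + 1)
        (if pyLtInf |mathComb (h + m - 1) (m - 1) - t| best_diff then h else best_h)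
        (if pyLtInf |mathComb (h + m - 1) (m - 1) - t| best_diff then some |mathComb (h + m - 1) (m - 1) - t| else best_diff)

def find_n_partitions (n_objectives : Int) (target_population : Int) : Int :=
  if n_objectives ≤ 2 then max 1 (target_population - 1)
  else loopA n_objectives target_population 199 1 1 none

-- ===== PORT B =====
-- Source B's local helper C(h) = math.comb(h + m - 1, m - 1)
def combC (m h : Int) : Int := mathComb (h + m - 1) (m - 1)

-- Source B's `while lo < hi` binary search; lo, hi are the Python ints 1..199 (always positive,
-- where Python's // is Nat division)
def bsearchB (m t : Int) (lo hi : Nat) : Nat :=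
  if lo < hi then
    let mid := (lo + hi) / 2
    if t ≤ combC m (mid : Int) then bsearchB m t lo mid
    else bsearchB m t (mid + 1) hi
  else lo
termination_by hi - lo
decreasing_by all_goals omega

def find_n_partitions_alt (n_objectives : Int) (target_population : Int) : Int :=
  if n_objectives ≤ 2 then max 1 (target_population - 1)
  else if combC n_objectives 199 < target_population then 199
  else
    let lo := bsearchB n_objectives target_population 1 199
    if lo = 1 then 1
    else if combC n_objectives (lo : Int) - target_population < target_population - combC n_objectives ((lo : Int) - 1) then (lo : Int)
    else (lo : Int) - 1

-- ===== PRECONDITION & SPEC =====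
def Spec_find_n_partitions (n_objectives : Int) (target_population : Int) (out : Int) : Prop := out = find_n_partitions_alt n_objectives target_population
instance (n_objectives : Int) (target_population : Int) (out : Int) : Decidable (Spec_find_n_partitions n_objectives target_population out) := by unfold Spec_find_n_partitions; infer_instance

-- ===== CLAIM (what is proved, stated in full; the proofs are below) =====
def Claim_equal_find_n_partitions : Prop := ∀ (n_objectives : Int) (target_population : Int), Dom_find_n_partitions n_objectives target_population → Spec_find_n_partitions n_objectives target_population (find_n_partitions n_objectives target_population)

-- ===== LEMMAS AND PROOFS =====

lemma foldl_range_choose (n : Nat) : ∀ (j : Nat), j ≤ n →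
    (List.range j).foldl (fun acc i => acc * (n - i) / (i + 1)) 1 = n.choose j := by
  intro j
  induction j with
  | zero => intro _; simp
  | succ j ih =>
    intro hj
    rw [List.range_succ, List.foldl_append, ih (by omega)]
    simp only [List.foldl_cons, List.foldl_nil]
    rw [← Nat.choose_succ_right_eq, Nat.mul_div_cancel _ (by omega)]

lemma mathComb_eq_choose (n k : Nat) : mathComb (n : Int) (k : Nat) = (n.choose k : Int) := by
  unfold mathComb
  simp only [Int.toNat_natCast]
  by_cases h : n < k
  · simp [h, Nat.choose_eq_zero_of_lt h]
  · simp only [h, if_false]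
    push Not at h
    rcases Nat.le_total k (n - k) with hmin | hmin
    · rw [min_eq_left hmin, foldl_range_choose n k h]
    · rw [min_eq_right hmin, foldl_range_choose n (n - k) (by omega),
        Nat.choose_symm h]

lemma combC_eq_choose (m h : Int) (hm : 3 ≤ m) (hh : 1 ≤ h) :
    combC m h = ((h + m - 1).toNat.choose (m - 1).toNat : Int) := by
  unfold combC
  have e1 : h + m - 1 = ((h + m - 1).toNat : Int) := by omega
  have e2 : m - 1 = ((m - 1).toNat : Int) := by omega
  rw [e1, e2, mathComb_eq_choose]
  simp

lemma combC_nonneg (m h : Int) (hm : 3 ≤ m) (hh : 1 ≤ h) : 0 ≤ combC m h := by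
  rw [combC_eq_choose m h hm hh]; positivity

lemma combC_strict (m h : Int) (hm : 3 ≤ m) (hh : 1 ≤ h) : combC m h < combC m (h + 1) := by
  rw [combC_eq_choose m h hm hh, combC_eq_choose m (h+1) hm (by omega)]
  have e : (h + 1 + m - 1).toNat = (h + m - 1).toNat + 1 := by omega
  rw [e]
  have hk : 1 ≤ (m - 1).toNat := by omega
  obtain ⟨j, hj⟩ : ∃ j, (m - 1).toNat = j + 1 := ⟨(m - 1).toNat - 1, by omega⟩
  rw [hj]
  have hle : j + 1 ≤ (h + m - 1).toNat := by omega
  have hs := Nat.choose_succ_succ (h + m - 1).toNat j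
  simp only [Nat.succ_eq_add_one] at hs
  have hpos : 0 < (h + m - 1).toNat.choose j := Nat.choose_pos (by omega)
  have : (h + m - 1).toNat.choose (j + 1) < ((h + m - 1).toNat + 1).choose (j + 1) := by omega
  exact_mod_cast this

lemma combC_mono (m : Int) (hm : 3 ≤ m) (h h' : Int) (hh : 1 ≤ h) (hle : h ≤ h') :
    combC m h ≤ combC m h' := by
  induction h', hle using Int.le_induction with
  | base => exact le_refl _
  | succ n hn ih => exact le_trans ih (le_of_lt (combC_strict m n hm (by omega)))

-- If no future diff is strictly below the current best, the loop keeps best_h.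
lemma loopA_noupdate (m t : Int) : ∀ (fuel : Nat) (h bh bd : Int),
    (∀ i : Nat, i < fuel → bd ≤ |combC m (h + i) - t|) →
    loopA m t fuel h bh (some bd) = bh := by
  intro fuel
  induction fuel with
  | zero => intro h bh bd _; rfl
  | succ fuel ih =>
    intro h bh bd hb
    have h0 : bd ≤ |combC m h - t| := by
      have := hb 0 (by omega); simpa using this
    have hlt : pyLtInf |mathComb (h + m - 1) (m - 1) - t| (some bd) = false := by
      simp only [pyLtInf, decide_eq_false_iff_not, not_lt]
      exact h0
    simp only [loopA, hlt, if_false, Bool.false_eq_true]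
    split
    · rfl
    · exact ih (h + 1) bh bd (by
        intro i hi
        have := hb (i + 1) (by omega)
        have e : h + 1 + (i : Int) = h + ((i : Nat) + 1 : Nat) := by push_cast; ring
        rw [e]; exact_mod_cast this)

lemma loopA_succ (m t : Int) (fuel : Nat) (h bh : Int) (bd : Option Int) :
    loopA m t (fuel + 1) h bh bd
      = if t * 2 < mathComb (h + m - 1) (m - 1) then
          (if pyLtInf |mathComb (h + m - 1) (m - 1) - t| bd then h else bh)
        else
          loopA m t fuel (h + 1)
            (if pyLtInf |mathComb (h + m - 1) (m - 1) - t| bd then h else bh)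
            (if pyLtInf |mathComb (h + m - 1) (m - 1) - t| bd then some |mathComb (h + m - 1) (m - 1) - t| else bd) := rfl

-- While C(h) stays below t the diffs strictly shrink: after k+1 more iterations the state
-- is (h+k, t - C(h+k)) and the loop continues at h+k+1.
lemma loopA_phase (m t : Int) (hm : 3 ≤ m) : ∀ (k fuel : Nat) (h bh : Int) (bd : Option Int),
    1 ≤ h →
    (∀ i : Nat, i ≤ k → combC m (h + i) < t) →
    pyLtInf (t - combC m h) bd = true →
    loopA m t (k + 1 + fuel) h bh bd
      = loopA m t fuel (h + k + 1) (h + k) (some (t - combC m (h + k))) := by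
  intro k
  induction k with
  | zero =>
    intro fuel h bh bd hh hlt hbd
    have hCh : combC m h < t := by have := hlt 0 (by omega); simpa using this
    have hC0 : 0 ≤ combC m h := combC_nonneg m h hm hh
    have habs : |mathComb (h + m - 1) (m - 1) - t| = t - combC m h := by
      rw [abs_of_neg (by unfold combC at hCh; omega)]; unfold combC; ring
    have hnb : ¬ (t * 2 < mathComb (h + m - 1) (m - 1)) := by
      unfold combC at hCh hC0; omega
    have e : 0 + 1 + fuel = fuel + 1 := by omega
    rw [e]
    simp only [loopA, habs, hbd, if_true, hnb, if_false]
    norm_num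
  | succ k ih =>
    intro fuel h bh bd hh hlt hbd
    have hCh : combC m h < t := by have := hlt 0 (by omega); simpa using this
    have hC0 : 0 ≤ combC m h := combC_nonneg m h hm hh
    have habs : |mathComb (h + m - 1) (m - 1) - t| = t - combC m h := by
      rw [abs_of_neg (by unfold combC at hCh; omega)]; unfold combC; ring
    have hnb : ¬ (t * 2 < mathComb (h + m - 1) (m - 1)) := by
      unfold combC at hCh hC0; omega
    have estep : k + 1 + 1 + fuel = k + 1 + (fuel + 1) := by omega
    have e1 : (k + 1 + fuel) = k + 1 + fuel := rfl
    show loopA m t (k + 1 + 1 + fuel) h bh bd = _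
    have : loopA m t (k + 1 + 1 + fuel) h bh bd
        = loopA m t (k + 1 + fuel) (h + 1)
            (if pyLtInf |mathComb (h + m - 1) (m - 1) - t| bd then h else bh)
            (if pyLtInf |mathComb (h + m - 1) (m - 1) - t| bd then some |mathComb (h + m - 1) (m - 1) - t| else bd) := by
      have efuel : k + 1 + 1 + fuel = (k + 1 + fuel) + 1 := by omega
      rw [efuel]
      simp only [loopA, hnb, if_false]
    rw [this]
    simp only [habs, hbd, if_true]
    have ihres := ih fuel (h + 1) h (some (t - combC m h)) (by omega)
      (by
        intro i hi
        have := hlt (i + 1) (by omega)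
        have e : h + 1 + (i : Int) = h + ((i + 1 : Nat) : Int) := by push_cast; ring
        rw [e]; exact_mod_cast this)
      (by
        simp only [pyLtInf, decide_eq_true_eq]
        have := combC_strict m h hm hh
        omega)
    rw [ihres]
    have e2 : h + 1 + (k : Int) + 1 = h + ((k : Int) + 1) + 1 := by ring
    have e3 : h + 1 + (k : Int) = h + ((k : Int) + 1) := by ring
    rw [e2, e3]
    norm_num

-- One step at the crossover h0, then no further update: the result is h0 or h0-1.
lemma loopA_last (m t : Int) (hm : 3 ≤ m) (h0 : Int) (fuel : Nat)
    (h2 : 2 ≤ h0) (_hlt : combC m (h0 - 1) < t) (hge : t ≤ combC m h0) :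
    loopA m t (fuel + 1) h0 (h0 - 1) (some (t - combC m (h0 - 1)))
      = (if combC m h0 - t < t - combC m (h0 - 1) then h0 else h0 - 1) := by
  have hup : ∀ i : Nat, t ≤ combC m (h0 + 1 + i) := by
    intro i
    exact le_trans hge (combC_mono m hm h0 (h0 + 1 + i) (by omega) (by omega))
  simp only [loopA]
  rw [show mathComb (h0 + m - 1) (m - 1) = combC m h0 from rfl,
    abs_of_nonneg (show (0:Int) ≤ combC m h0 - t by omega)]
  by_cases hc : combC m h0 - t < t - combC m (h0 - 1)
  · have hpy : pyLtInf (combC m h0 - t) (some (t - combC m (h0 - 1))) = true := by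
      simp [pyLtInf, hc]
    rw [if_pos hc]
    simp only [hpy, if_true]
    split
    · rfl
    · exact loopA_noupdate m t fuel (h0 + 1) h0 (combC m h0 - t) (by
        intro i _
        rw [abs_of_nonneg (by have := hup i; omega)]
        have := combC_mono m hm h0 (h0 + 1 + i) (by omega) (by omega)
        omega)
  · have hpy : pyLtInf (combC m h0 - t) (some (t - combC m (h0 - 1))) = false := by
      simp only [pyLtInf, decide_eq_false_iff_not]; exact hc
    rw [if_neg hc]
    simp only [hpy, if_false, Bool.false_eq_true]
    split
    · rfl
    · exact loopA_noupdate m t fuel (h0 + 1) (h0 - 1) (t - combC m (h0 - 1)) (by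
        intro i _
        rw [abs_of_nonneg (by have := hup i; omega)]
        have := combC_mono m hm h0 (h0 + 1 + i) (by omega) (by omega)
        omega)

lemma bsearchB_eq (m t : Int) (hm : 3 ≤ m) (h0 : Nat) (hh0 : 1 ≤ h0) (hge : t ≤ combC m h0)
    (hleast : ∀ h : Nat, 1 ≤ h → h < h0 → combC m h < t) :
    ∀ (n lo hi : Nat), hi - lo ≤ n → 1 ≤ lo → lo ≤ h0 → h0 ≤ hi →
    bsearchB m t lo hi = h0 := by
  intro n
  induction n with
  | zero =>
    intro lo hi hb h1 h2 h3
    unfold bsearchB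
    rw [if_neg (by omega)]
    omega
  | succ n ih =>
    intro lo hi hb h1 h2 h3
    by_cases hlh : lo < hi
    · unfold bsearchB
      rw [if_pos hlh]
      show (if t ≤ combC m (((lo + hi) / 2 : Nat) : Int) then bsearchB m t lo ((lo + hi) / 2)
        else bsearchB m t ((lo + hi) / 2 + 1) hi) = h0
      by_cases hcm : t ≤ combC m (((lo + hi) / 2 : Nat) : Int)
      · rw [if_pos hcm]
        have hmid : h0 ≤ (lo + hi) / 2 := by
          by_contra hcon
          have := hleast ((lo + hi) / 2) (by omega) (by omega)
          omega
        exact ih lo ((lo + hi) / 2) (by omega) h1 h2 hmid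
      · rw [if_neg hcm]
        have hmid : (lo + hi) / 2 < h0 := by
          by_contra hcon
          have hmono := combC_mono m hm (h0 : Int) (((lo + hi) / 2 : Nat) : Int)
            (by exact_mod_cast hh0) (by exact_mod_cast not_lt.mp hcon)
          omega
        exact ih ((lo + hi) / 2 + 1) hi (by omega) (by omega) (by omega) h3
    · unfold bsearchB
      rw [if_neg hlh]
      omega

theorem main_eq : ∀ (n_objectives : Int) (target_population : Int),
    find_n_partitions n_objectives target_population
      = find_n_partitions_alt n_objectives target_population := by
  intro m t
  unfold find_n_partitions find_n_partitions_alt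
  by_cases hm2 : m ≤ 2
  · rw [if_pos hm2, if_pos hm2]
  · rw [if_neg hm2, if_neg hm2]
    have hm : 3 ≤ m := by omega
    by_cases hbig : combC m 199 < t
    · rw [if_pos hbig]
      have hph := loopA_phase m t hm 198 0 1 1 none (by omega)
        (by
          intro i hi
          refine lt_of_le_of_lt (combC_mono m hm (1 + (i : Int)) 199 (by omega) (by
            have : (i : Int) ≤ 198 := by exact_mod_cast hi
            omega)) hbig)
        (by simp [pyLtInf])
      norm_num at hph
      rw [hph]
      norm_num [loopA]
    · rw [if_neg hbig]
      have hP199 : 1 ≤ (199 : Int) ∧ t ≤ combC m 199 := ⟨by norm_num, not_lt.mp hbig⟩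
      obtain ⟨h0, ⟨hh01, hh0ge⟩, hmin⟩ :=
        Int.exists_least_of_bdd (P := fun z => 1 ≤ z ∧ t ≤ combC m z)
          ⟨1, fun z hz => hz.1⟩ ⟨199, hP199⟩
      have h0le : h0 ≤ 199 := hmin 199 hP199
      have hltc : ∀ h : Int, 1 ≤ h → h < h0 → combC m h < t := by
        intro h hh1 hhlt
        by_contra hcon
        have := hmin h ⟨hh1, not_lt.mp hcon⟩
        omega
      obtain ⟨n0, hcast⟩ : ∃ n0 : Nat, h0 = (n0 : Int) := ⟨h0.toNat, by omega⟩
      have hn01 : 1 ≤ n0 := by omega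
      have hn0le : n0 ≤ 199 := by omega
      have hbs : bsearchB m t 1 199 = n0 := by
        refine bsearchB_eq m t hm n0 hn01 (by rw [← hcast]; exact hh0ge)
          (fun h hh1 hhlt => hltc (h : Int) (by exact_mod_cast hh1) (by omega))
          198 1 199 (by omega) (by omega) (by omega) (by omega)
      rw [hbs]
      by_cases hn1 : n0 = 1
      · rw [if_pos hn1]
        have hge1 : t ≤ combC m 1 := by
          rw [← show h0 = (1:Int) by omega] at *
          exact hh0ge
        rw [show (199 : Nat) = 198 + 1 from rfl, loopA_succ]
        rw [show mathComb (1 + m - 1) (m - 1) = combC m 1 from rfl,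
          abs_of_nonneg (show (0:Int) ≤ combC m 1 - t by omega)]
        simp only [pyLtInf, if_true]
        split
        · rfl
        · exact loopA_noupdate m t 198 2 1 (combC m 1 - t) (by
            intro i _
            have hup : t ≤ combC m (2 + i) :=
              le_trans hge1 (combC_mono m hm 1 (2 + i) (by omega) (by omega))
            rw [abs_of_nonneg (by omega)]
            have := combC_mono m hm 1 (2 + i) (by omega) (by omega)
            omega)
      · rw [if_neg hn1]
        have h02 : 2 ≤ h0 := by omega
        have hph := loopA_phase m t hm (n0 - 2) (200 - n0) 1 1 none (by omega)
          (by
            intro i hi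
            refine hltc (1 + (i : Int)) (by omega) ?_
            have : (i : Int) ≤ ((n0 - 2 : Nat) : Int) := by exact_mod_cast hi
            have : ((n0 - 2 : Nat) : Int) = h0 - 2 := by omega
            omega)
          (by simp [pyLtInf])
        have ek : (n0 - 2) + 1 + (200 - n0) = 199 := by omega
        rw [ek] at hph
        have ec : ((n0 - 2 : Nat) : Int) = h0 - 2 := by omega
        rw [ec] at hph
        have e1 : (1 : Int) + (h0 - 2) + 1 = h0 := by ring
        have e2 : (1 : Int) + (h0 - 2) = h0 - 1 := by ring
        rw [e1, e2] at hph
        have ef : 200 - n0 = (199 - n0) + 1 := by omega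
        rw [ef] at hph
        rw [hph]
        rw [loopA_last m t hm h0 (199 - n0) h02
          (hltc (h0 - 1) (by omega) (by omega)) hh0ge]
        rw [show ((n0 : Int)) = h0 from hcast.symm]

-- ===== VERDICT (by name: the statement is the Claim_ definition above) =====
theorem find_n_partitions_spec : Claim_equal_find_n_partitions := by
  intro m t _
  unfold Spec_find_n_partitions
  exact main_eq m t
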